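-- pv_equiv track=rewrite | github.com/Nghia03092004/nghia03092004.github.io | project_euler/problem_426/solution.py | soliton_decomposition
-- ===== SOURCE A (Python) =====
-- def soliton_decomposition(config):
--     """Extract soliton sizes from a box-ball configuration."""
--     carrier = 0
--     solitons = []
--     prev_carrier = 0
--     for b in config:
--         if b == 1:
--             carrier += 1
--         else:
--             if carrier > 0:
--                 carrier -= 1
--         if carrier > prev_carrier:
--             pass  # ascending
--         elif carrier < prev_carrier and prev_carrier > 0:
--             solitons.append(prev_carrier)
--         prev_carrier = carrier
--     if carrier > 0:
--         solitons.append(carrier)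
--     return sorted(solitons, reverse=True)
-- ===== SOURCE B (Python) =====
-- def soliton_decomposition(config):
--     """Extract soliton sizes via run-length encoding: compress config into
--     maximal runs of ones / non-ones, then process whole runs arithmetically
--     (a non-one run of length L emits the descending range of carrier values
--     in one stroke instead of stepping the counter element by element)."""
--     runs = []
--     for b in config:
--         is_one = (b == 1)
--         if runs and runs[-1][0] == is_one:
--             runs[-1][1] += 1
--         else:
--             runs.append([is_one, 1])
--     carrier = 0
--     solitons = []
--     for is_one, length in runs:
--         if is_one:
--             carrier += length
--         else:
--             d = min(length, carrier)
--             solitons.extend(range(carrier, carrier - d, -1))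
--             carrier -= d
--     if carrier > 0:
--         solitons.append(carrier)
--     return sorted(solitons, reverse=True)
-- ===== Notes on version B (the rewrite author's own statement) =====
-- stated objective: alternative
-- what changed: B run-length encodes the config into maximal one/non-one runs and processes each run arithmetically (a non-one run of length L emits range(carrier, carrier-min(L,carrier), -1) in one stroke), replacing A's element-by-element counter update and three-way branch.
import Mathlib
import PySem

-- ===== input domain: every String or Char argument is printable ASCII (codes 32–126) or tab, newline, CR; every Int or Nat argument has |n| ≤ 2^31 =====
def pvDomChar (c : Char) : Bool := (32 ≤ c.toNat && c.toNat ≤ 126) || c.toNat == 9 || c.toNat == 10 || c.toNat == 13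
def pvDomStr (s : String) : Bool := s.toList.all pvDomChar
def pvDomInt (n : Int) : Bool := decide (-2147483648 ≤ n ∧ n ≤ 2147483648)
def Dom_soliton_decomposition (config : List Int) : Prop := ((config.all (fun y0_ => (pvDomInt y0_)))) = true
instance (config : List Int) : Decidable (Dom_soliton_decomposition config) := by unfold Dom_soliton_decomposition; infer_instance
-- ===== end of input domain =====

-- B replaces A's element-by-element counter loop by run-length encoding the config and
-- processing each run arithmetically (a non-one run emits a descending range in one stroke);
-- objective: alternative algorithm, same asymptotic cost.

-- ===== PORT A =====
-- A's loop body: update carrier, then the three-way ascending/descending/plateau branch, then prev := carrier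
def stepA (st : Int × List Int × Int) (b : Int) : Int × List Int × Int :=
  let carrier := if b = 1 then st.1 + 1 else if st.1 > 0 then st.1 - 1 else st.1
  let solitons := if carrier > st.2.2 then st.2.1
    else if carrier < st.2.2 ∧ st.2.2 > 0 then st.2.1 ++ [st.2.2] else st.2.1
  (carrier, solitons, carrier)

def soliton_decomposition (config : List Int) : List Int :=
  let r := config.foldl stepA (0, [], 0)
  let solitons := if r.1 > 0 then r.2.1 ++ [r.1] else r.2.1
  PySem.List.sorted solitons (fun x => x) true

-- ===== PORT B =====
-- B pass 1: run-length encoding — extend the last run if it matches, else append [is_one, 1]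
def rleAdd (runs : List (Bool × Int)) (b : Int) : List (Bool × Int) :=
  let isOne : Bool := b == 1
  match runs.getLast? with
  | some (v, l) => if v == isOne then runs.dropLast ++ [(v, l + 1)] else runs ++ [(isOne, 1)]
  | none => [(isOne, 1)]

-- B pass 2: process a whole run arithmetically; a non-one run of length L emits
-- range(carrier, carrier - min(L, carrier), -1) at once
def blockStep (st : Int × List Int) (r : Bool × Int) : Int × List Int :=
  if r.1 then (st.1 + r.2, st.2)
  else
    let d := min r.2 st.1
    (st.1 - d, st.2 ++ PySem.List.pyRange st.1 (st.1 - d) (-1))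

def soliton_decomposition_alt (config : List Int) : List Int :=
  let runs := config.foldl rleAdd []
  let p := runs.foldl blockStep (0, [])
  let solitons := if p.1 > 0 then p.2 ++ [p.1] else p.2
  PySem.List.sorted solitons (fun x => x) true

-- ===== PRECONDITION & SPEC =====
def Spec_soliton_decomposition (config : List Int) (out : List Int) : Prop := out = soliton_decomposition_alt config
instance (config : List Int) (out : List Int) : Decidable (Spec_soliton_decomposition config out) := by unfold Spec_soliton_decomposition; infer_instance

-- ===== CLAIM =====
def Claim_equal_soliton_decomposition : Prop := ∀ (config : List Int), Dom_soliton_decomposition config → Spec_soliton_decomposition config (soliton_decomposition config)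

-- ===== LEMMAS AND PROOFS =====

-- one A-step lifted to B's (carrier, solitons) state
def liftA (st : Int × List Int) (b : Int) : Int × List Int :=
  let r := stepA (st.1, st.2, st.1) b
  (r.1, r.2.1)

-- a run of length 0 does nothing
theorem blockStep_zero (st : Int × List Int) (v : Bool) (h : 0 ≤ st.1) :
    blockStep st (v, 0) = st := by
  cases v with
  | true => simp [blockStep]
  | false =>
    simp only [blockStep]
    have hm : min (0 : Int) st.1 = 0 := by omega
    rw [if_neg (by simp), hm, PySem.List.pyRange_neg_one_eq_nil (by omega)]
    simp

-- extending a run by one element = one more A-step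
theorem blockStep_succ (st : Int × List Int) (v : Bool) (l : Int) (b : Int)
    (hst : 0 ≤ st.1) (hl : 0 ≤ l) (hv : (b == 1) = v) :
    blockStep st (v, l + 1) = liftA (blockStep st (v, l)) b := by
  have hb1 : (b = 1) ↔ (v = true) := by
    constructor
    · intro h; rw [← hv, h]; rfl
    · intro h; rw [h] at hv; exact beq_iff_eq.mp hv
  cases v with
  | true =>
    have hb : b = 1 := hb1.mpr rfl
    simp [blockStep, liftA, stepA, hb]
    omega
  | false =>
    have hb : ¬ b = 1 := fun h => by simpa using hb1.mp h
    by_cases hcl : st.1 ≤ l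
    · -- run already drains the carrier: the extra element is a no-op
      have h1 : min (l + 1) st.1 = st.1 := by omega
      have h2 : min l st.1 = st.1 := by omega
      simp only [blockStep, liftA, stepA, h1, h2]
      simp [hb, sub_self]
    · have hlc : l < st.1 := by omega
      -- carrier still positive after l steps: the extra step drops it and records st.1 - l
      have h1 : min (l + 1) st.1 = l + 1 := by omega
      have h2 : min l st.1 = l := by omega
      have hrange : PySem.List.pyRange st.1 (st.1 - (l + 1)) (-1)
          = PySem.List.pyRange st.1 (st.1 - l) (-1) ++ [st.1 - l] := by
        rw [PySem.List.pyRange_neg_one, PySem.List.pyRange_neg_one]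
        have hn : (st.1 - (st.1 - (l + 1))).toNat = (st.1 - (st.1 - l)).toNat + 1 := by omega
        rw [hn, List.range_succ, List.map_append]
        simp
        omega
      simp only [blockStep, liftA, stepA, h1, h2]
      simp [hb, hrange, hlc]
      omega

-- carrier stays nonnegative through B's run fold (lengths nonneg)
theorem foldl_blockStep_nonneg (R : List (Bool × Int)) (st : Int × List Int)
    (h : 0 ≤ st.1) (hR : ∀ r ∈ R, 0 ≤ r.2) : 0 ≤ (R.foldl blockStep st).1 := by
  induction R generalizing st with
  | nil => exact h
  | cons r R ih =>
    refine ih (blockStep st r) ?_ (fun x hx => hR x (List.mem_cons_of_mem r hx))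
    have hr : 0 ≤ r.2 := hR r (List.mem_cons_self)
    rcases r with ⟨v, l⟩
    cases v with
    | true => simp only [blockStep]; simp; omega
    | false => simp only [blockStep]; simp

-- rleAdd keeps all run lengths nonnegative
theorem rleAdd_lengths (R : List (Bool × Int)) (b : Int)
    (hR : ∀ r ∈ R, 0 ≤ r.2) : ∀ r ∈ rleAdd R b, 0 ≤ r.2 := by
  intro r hr
  unfold rleAdd at hr
  rcases hg : R.getLast? with _ | ⟨v, l⟩
  · rw [hg] at hr
    dsimp only at hr
    simp at hr
    simp [hr]
  · rw [hg] at hr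
    dsimp only at hr
    have hl : 0 ≤ l := hR (v, l) (List.mem_of_getLast? hg)
    by_cases hv : v == (b == 1)
    · rw [if_pos hv] at hr
      rcases List.mem_append.mp hr with h1 | h1
      · exact hR r (List.dropLast_subset _ h1)
      · simp at h1; subst h1; simpa using by omega
    · rw [if_neg hv] at hr
      rcases List.mem_append.mp hr with h1 | h1
      · exact hR r h1
      · simp at h1; subst h1; simp

theorem rle_lengths (config : List Int) : ∀ r ∈ config.foldl rleAdd [], 0 ≤ r.2 := by
  induction config using List.reverseRecOn with
  | nil => intro r hr; simp at hr
  | append_singleton xs b ih =>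
    rw [List.foldl_append]
    exact rleAdd_lengths _ b ih

-- folding blockStep over (rleAdd R b) = one more lifted A-step after folding over R
theorem foldl_rleAdd (R : List (Bool × Int)) (b : Int) (st : Int × List Int)
    (h : 0 ≤ st.1) (hR : ∀ r ∈ R, 0 ≤ r.2) :
    (rleAdd R b).foldl blockStep st = liftA (R.foldl blockStep st) b := by
  unfold rleAdd
  rcases hg : R.getLast? with _ | ⟨v, l⟩
  · have hnil : R = [] := List.getLast?_eq_none_iff.mp hg
    subst hnil
    simp only [List.foldl_cons, List.foldl_nil]
    rw [← blockStep_zero st (b == 1) h, ← blockStep_succ st (b == 1) 0 b h le_rfl rfl,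
      blockStep_zero st (b == 1) h]
    simp
  · dsimp only
    have hmem : (v, l) ∈ R := List.mem_of_getLast? hg
    have hl : 0 ≤ l := hR (v, l) hmem
    have hne : R ≠ [] := by rintro rfl; simp at hg
    have hlast : R.getLast hne = (v, l) := by
      have := List.getLast?_eq_some_getLast hne
      rw [hg] at this
      exact (Option.some_inj.mp this).symm
    have hsplit : R.dropLast ++ [(v, l)] = R := by
      rw [← hlast]; exact List.dropLast_concat_getLast hne
    have hdl : ∀ r ∈ R.dropLast, 0 ≤ r.2 := fun r hr => hR r (List.dropLast_subset _ hr)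
    have hnn : 0 ≤ (R.dropLast.foldl blockStep st).1 := foldl_blockStep_nonneg _ st h hdl
    by_cases hv : v == (b == 1)
    · rw [if_pos hv]
      have hveq : (b == 1) = v := (beq_iff_eq.mp hv).symm
      rw [List.foldl_append, List.foldl_cons, List.foldl_nil,
        blockStep_succ _ v l b hnn (hR _ (List.mem_of_getLast? hg)) hveq]
      conv_rhs => rw [← hsplit]
      rw [List.foldl_append]
      simp
    · rw [if_neg hv]
      have hnn2 : 0 ≤ (R.foldl blockStep st).1 :=
        foldl_blockStep_nonneg _ st h hR
      rw [List.foldl_append, List.foldl_cons, List.foldl_nil,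
        ← blockStep_zero (R.foldl blockStep st) (b == 1) hnn2,
        ← blockStep_succ _ (b == 1) 0 b hnn2 le_rfl rfl,
        blockStep_zero _ (b == 1) hnn2]
      norm_num

-- main invariant: A's fold and B's two-phase computation agree
theorem key (config : List Int) :
    config.foldl stepA (0, [], 0) =
      (((config.foldl rleAdd []).foldl blockStep (0, [])).1,
       ((config.foldl rleAdd []).foldl blockStep (0, [])).2,
       ((config.foldl rleAdd []).foldl blockStep (0, [])).1) := by
  induction config using List.reverseRecOn with
  | nil => rfl
  | append_singleton xs b ih =>
    rw [List.foldl_append, List.foldl_append, ih]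
    simp only [List.foldl_cons, List.foldl_nil]
    rw [foldl_rleAdd _ b _ (by norm_num) (rle_lengths xs)]
    rfl

-- ===== VERDICT =====
theorem soliton_decomposition_spec : Claim_equal_soliton_decomposition := by
  intro config _
  unfold Spec_soliton_decomposition soliton_decomposition soliton_decomposition_alt
  rw [key]
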